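-- pv_equiv track=rewrite | github.com/remibert/pycameresp | modules/lib/tools/filesystem.py | splitext
-- ===== SOURCE A (Python) =====
-- def splitext(p):
-- 	""" Split file extension """
-- 	sep='\\'
-- 	altsep = '/'
-- 	extsep = '.'
-- 	sep_index = p.rfind(sep)
-- 	if altsep:
-- 		altsepIndex = p.rfind(altsep)
-- 		sep_index = max(sep_index, altsepIndex)
--
-- 	dot_index = p.rfind(extsep)
-- 	if dot_index > sep_index:
-- 		filename_index = sep_index + 1
-- 		while filename_index < dot_index:
-- 			if p[filename_index:filename_index+1] != extsep:
-- 				return p[:dot_index], p[dot_index:]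
-- 			filename_index += 1
-- 	return p, p[:0]
-- ===== SOURCE B (Python) =====
-- def splitext(p):
-- 	""" Split file extension """
-- 	sep_index = max(p.rfind('\\'), p.rfind('/'))
-- 	base = p[sep_index + 1:]
-- 	n_lead = len(base) - len(base.lstrip('.'))
-- 	dot = base.rfind('.')
-- 	if dot >= n_lead:
-- 		cut = sep_index + 1 + dot
-- 		return p[:cut], p[cut:]
-- 	return p, ''
-- ===== Notes on version B (the rewrite author's own statement) =====
-- stated objective: simpler
-- what changed: B drops A's character-by-character dot-skipping while-loop: it slices the basename after the last separator, counts its leading dots with lstrip, and decides the split by one index comparison (dot >= n_lead).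
import Mathlib
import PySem

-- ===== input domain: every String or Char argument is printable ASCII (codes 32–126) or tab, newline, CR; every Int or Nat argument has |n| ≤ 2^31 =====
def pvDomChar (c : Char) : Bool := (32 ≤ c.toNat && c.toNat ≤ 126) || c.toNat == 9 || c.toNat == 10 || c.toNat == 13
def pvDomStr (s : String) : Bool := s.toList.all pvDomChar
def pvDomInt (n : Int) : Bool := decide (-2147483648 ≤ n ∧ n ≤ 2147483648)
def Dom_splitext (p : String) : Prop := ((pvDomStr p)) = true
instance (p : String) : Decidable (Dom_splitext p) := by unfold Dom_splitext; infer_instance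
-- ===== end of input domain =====

-- B replaces A's dot-skipping while-loop by basename slicing plus a leading-dot count; objective: simpler.

-- ===== PORT A =====
-- the 'while filename_index < dot_index' loop of A, step for step
def splitextLoopA (s : List Char) (dotIdx : Int) (fi : Int) : String × String :=
  if _h : fi < dotIdx then
    if PySem.List.slice s (some fi) (some (fi + 1)) ≠ ['.'] then
      (String.ofList (PySem.List.slice s none (some dotIdx)),
       String.ofList (PySem.List.slice s (some dotIdx) none))
    else splitextLoopA s dotIdx (fi + 1)
  else (String.ofList s, String.ofList (PySem.List.slice s none (some 0)))
termination_by (dotIdx - fi).toNat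
decreasing_by omega

def splitext (p : String) : String × String :=
  let s := p.toList
  let sepIndex0 := PySem.Chars.rfind s ['\\']
  let altsepIndex := PySem.Chars.rfind s ['/']
  let sepIndex := max sepIndex0 altsepIndex
  let dotIndex := PySem.Chars.rfind s ['.']
  if dotIndex > sepIndex then splitextLoopA s dotIndex (sepIndex + 1)
  else (p, "")

-- ===== PORT B =====
def splitext_alt (p : String) : String × String :=
  let s := p.toList
  let sepIndex := max (PySem.Chars.rfind s ['\\']) (PySem.Chars.rfind s ['/'])
  let base := PySem.List.slice s (some (sepIndex + 1)) none
  -- len(base) - len(base.lstrip('.')) : lstrip('.') drops the leading '.' characters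
  let nLead : Int := (base.length : Int) - ((base.dropWhile (· == '.')).length : Int)
  let dot := PySem.Chars.rfind base ['.']
  if dot ≥ nLead then
    let cut := sepIndex + 1 + dot
    (String.ofList (PySem.List.slice s none (some cut)),
     String.ofList (PySem.List.slice s (some cut) none))
  else (p, "")

-- ===== PRECONDITION & SPEC =====
def Spec_splitext (p : String) (out : String × String) : Prop := out = splitext_alt p
instance (p : String) (out : String × String) : Decidable (Spec_splitext p out) := by unfold Spec_splitext; infer_instance

-- ===== CLAIM (what is proved, stated in full; the proofs are below) =====
def Claim_equal_splitext : Prop := ∀ (p : String), Dom_splitext p → Spec_splitext p (splitext p)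

-- ===== LEMMAS AND PROOFS =====

theorem singleton_isPrefixOf_iff (c : Char) (t : List Char) :
    [c].isPrefixOf t = true ↔ t[0]? = some c := by
  rw [List.isPrefixOf_iff_prefix]
  cases t with
  | nil => simp
  | cons a t => simp [List.cons_prefix_cons, eq_comm]

/-- Full characterisation of `rfind.go` on a singleton needle, indices up to `n`. -/
theorem rfind_go_spec (s : List Char) (c : Char) (n : Nat) :
    (PySem.Chars.rfind.go s [c] n = -1 ∧ ∀ i : Nat, i ≤ n → s[i]? ≠ some c) ∨
    (∃ i : Nat, i ≤ n ∧ PySem.Chars.rfind.go s [c] n = (i : Int) ∧ s[i]? = some c ∧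
      ∀ j : Nat, i < j → j ≤ n → s[j]? ≠ some c) := by
  induction n with
  | zero =>
    by_cases h : [c].isPrefixOf s = true
    · right
      refine ⟨0, le_refl _, ?_, ?_, ?_⟩
      · simp [PySem.Chars.rfind.go, h]
      · simpa [List.drop] using (singleton_isPrefixOf_iff c s).1 h
      · intro j hj hj0; omega
    · left
      constructor
      · simp [PySem.Chars.rfind.go, h]
      · intro i hi
        interval_cases i
        intro hc
        exact h ((singleton_isPrefixOf_iff c s).2 (by simpa using hc))
  | succ n ih =>
    by_cases h : [c].isPrefixOf (s.drop (n + 1)) = true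
    · right
      refine ⟨n + 1, le_refl _, ?_, ?_, ?_⟩
      · simp [PySem.Chars.rfind.go, h]
      · have := (singleton_isPrefixOf_iff c (s.drop (n + 1))).1 h
        simpa [List.getElem?_drop] using this
      · intro j hj hj1; omega
    · have hnc : s[n + 1]? ≠ some c := by
        intro hc
        exact h ((singleton_isPrefixOf_iff c (s.drop (n + 1))).2 (by simpa [List.getElem?_drop] using hc))
      have hgo : PySem.Chars.rfind.go s [c] (n + 1) = PySem.Chars.rfind.go s [c] n := by
        simp [PySem.Chars.rfind.go, h]
      rcases ih with ⟨h1, h2⟩ | ⟨i, hi, hgo', hci, hmax⟩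
      · left
        refine ⟨by rw [hgo]; exact h1, ?_⟩
        intro i hi
        rcases Nat.lt_or_ge i (n + 1) with hlt | hge
        · exact h2 i (by omega)
        · have : i = n + 1 := by omega
          subst this; exact hnc
      · right
        refine ⟨i, by omega, by rw [hgo]; exact hgo', hci, ?_⟩
        intro j hj hj1
        rcases Nat.lt_or_ge j (n + 1) with hlt | hge
        · exact hmax j hj (by omega)
        · have : j = n + 1 := by omega
          subst this; exact hnc

theorem rfind_single_spec (s : List Char) (c : Char) :
    (PySem.Chars.rfind s [c] = -1 ∧ ∀ i : Nat, s[i]? ≠ some c) ∨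
    (∃ i : Nat, i < s.length ∧ PySem.Chars.rfind s [c] = (i : Int) ∧ s[i]? = some c ∧
      ∀ j : Nat, i < j → s[j]? ≠ some c) := by
  rcases rfind_go_spec s c s.length with ⟨h1, h2⟩ | ⟨i, hi, hgo, hci, hmax⟩
  · left
    refine ⟨h1, ?_⟩
    intro i hc
    have : i < s.length := by
      by_contra hge
      rw [List.getElem?_eq_none (by omega)] at hc
      simp at hc
    exact h2 i (by omega) hc
  · right
    have hilt : i < s.length := by
      by_contra hge
      rw [List.getElem?_eq_none (by omega)] at hci
      simp at hci
    refine ⟨i, hilt, hgo, hci, ?_⟩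
    intro j hj hc
    have hjlt : j < s.length := by
      by_contra hge
      rw [List.getElem?_eq_none (by omega)] at hc
      simp at hc
    exact hmax j hj (by omega) hc

/-- rfind equals a given index when that index holds `c` and nothing above it does. -/
theorem rfind_eq_of (s : List Char) (c : Char) (i : Nat) (hci : s[i]? = some c)
    (hmax : ∀ j : Nat, i < j → s[j]? ≠ some c) : PySem.Chars.rfind s [c] = (i : Int) := by
  rcases rfind_single_spec s c with ⟨_, h2⟩ | ⟨i', _, hgo, hci', hmax'⟩
  · exact absurd hci (h2 i)
  · rcases Nat.lt_trichotomy i i' with h | h | h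
    · exact absurd hci' (hmax i' h)
    · subst h; exact hgo
    · exact absurd hci (hmax' i h)

theorem rfind_eq_neg_one (s : List Char) (c : Char)
    (h : ∀ i : Nat, s[i]? ≠ some c) : PySem.Chars.rfind s [c] = -1 := by
  rcases rfind_single_spec s c with ⟨h1, _⟩ | ⟨i, _, _, hci, _⟩
  · exact h1
  · exact absurd hci (h i)

theorem rfind_neg_one_le (s : List Char) (c : Char) : -1 ≤ PySem.Chars.rfind s [c] := by
  rcases rfind_single_spec s c with ⟨h1, _⟩ | ⟨i, _, hgo, _, _⟩
  · rw [h1]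
  · rw [hgo]; omega

theorem rfind_lt_length (s : List Char) (c : Char) :
    PySem.Chars.rfind s [c] < (s.length : Int) := by
  rcases rfind_single_spec s c with ⟨h1, _⟩ | ⟨i, hi, hgo, _, _⟩
  · rw [h1]; omega
  · rw [hgo]; exact_mod_cast hi

theorem rfind_max (s : List Char) (c : Char) (j : Nat)
    (hj : PySem.Chars.rfind s [c] < (j : Int)) : s[j]? ≠ some c := by
  rcases rfind_single_spec s c with ⟨_, h2⟩ | ⟨i, _, hgo, _, hmax⟩
  · exact h2 j
  · exact hmax j (by rw [hgo] at hj; exact_mod_cast hj)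

theorem rfind_get (s : List Char) (c : Char) (h : 0 ≤ PySem.Chars.rfind s [c]) :
    s[(PySem.Chars.rfind s [c]).toNat]? = some c := by
  rcases rfind_single_spec s c with ⟨h1, _⟩ | ⟨i, _, hgo, hci, _⟩
  · rw [h1] at h; omega
  · rw [hgo]; simpa using hci

theorem slice_one (s : List Char) (fi : Int) (h0 : 0 ≤ fi) (hlt : fi.toNat < s.length) :
    PySem.List.slice s (some fi) (some (fi + 1)) = [s[fi.toNat]] := by
  rw [PySem.List.slice_toNat s h0 (by omega)]
  have h1 : (fi + 1).toNat - fi.toNat = 1 := by omega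
  rw [h1, List.take_one, List.head?_drop, List.getElem?_eq_getElem hlt]
  rfl

/-- A's while-loop falls through when every character before the dot is a dot. -/
theorem loopA_of_all (s : List Char) (d : Int) :
    ∀ n : Nat, ∀ fi : Int, (d - fi).toNat = n → 0 ≤ fi → fi ≤ d → d ≤ (s.length : Int) →
    (∀ i : Nat, fi.toNat ≤ i → i < d.toNat → s[i]? = some '.') →
    splitextLoopA s d fi = (String.ofList s, String.ofList (PySem.List.slice s none (some 0))) := by
  intro n
  induction n with
  | zero =>
    intro fi hn h0 hfd _ _
    have hnot : ¬ fi < d := by omega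
    rw [splitextLoopA]
    simp [hnot]
  | succ n ih =>
    intro fi hn h0 hfd hdl hall
    have hlt : fi < d := by omega
    have hfl : fi.toNat < s.length := by omega
    have hdot : s[fi.toNat] = '.' := by
      have := hall fi.toNat le_rfl (by omega)
      rw [List.getElem?_eq_getElem hfl] at this
      exact Option.some.inj this
    rw [splitextLoopA]
    rw [dif_pos hlt, slice_one s fi h0 hfl, hdot, if_neg (by simp)]
    exact ih (fi + 1) (by omega) (by omega) (by omega) hdl
      (fun i hi1 hi2 => hall i (by omega) hi2)

/-- A's while-loop splits as soon as some character before the dot is not a dot. -/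
theorem loopA_of_ex (s : List Char) (d : Int) :
    ∀ n : Nat, ∀ fi : Int, (d - fi).toNat = n → 0 ≤ fi → fi ≤ d → d ≤ (s.length : Int) →
    (∃ i : Nat, fi.toNat ≤ i ∧ i < d.toNat ∧ s[i]? ≠ some '.') →
    splitextLoopA s d fi =
      (String.ofList (PySem.List.slice s none (some d)),
       String.ofList (PySem.List.slice s (some d) none)) := by
  intro n
  induction n with
  | zero =>
    intro fi hn h0 hfd _ hex
    rcases hex with ⟨i, hi1, hi2, _⟩
    omega
  | succ n ih =>
    intro fi hn h0 hfd hdl hex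
    have hlt : fi < d := by omega
    have hfl : fi.toNat < s.length := by omega
    rw [splitextLoopA, dif_pos hlt, slice_one s fi h0 hfl]
    by_cases hdot : s[fi.toNat] = '.'
    · rw [hdot, if_neg (by simp)]
      rcases hex with ⟨i, hi1, hi2, hi3⟩
      have hine : i ≠ fi.toNat := by
        intro h; subst h
        exact hi3 (by rw [List.getElem?_eq_getElem hfl, hdot])
      exact ih (fi + 1) (by omega) (by omega) (by omega) hdl ⟨i, by omega, hi2, hi3⟩
    · rw [if_pos (by simpa using hdot)]

-- ===== VERDICT (by name: the statement is the Claim_ definition above) =====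
theorem splitext_spec : Claim_equal_splitext := by
  intro p _
  unfold Spec_splitext splitext splitext_alt
  set s := p.toList with hs
  set sep : Int := max (PySem.Chars.rfind s ['\\']) (PySem.Chars.rfind s ['/']) with hsepdef
  set dot : Int := PySem.Chars.rfind s ['.'] with hdotdef
  have hsep1 : -1 ≤ sep := le_max_of_le_left (rfind_neg_one_le s '\\')
  have hsep2 : sep < (s.length : Int) :=
    max_lt (rfind_lt_length s '\\') (rfind_lt_length s '/')
  have hdot1 : -1 ≤ dot := rfind_neg_one_le s '.'
  have hdot2 : dot < (s.length : Int) := rfind_lt_length s '.'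
  set k : Nat := (sep + 1).toNat with hkdef
  have hk : (k : Int) = sep + 1 := by omega
  have hkle : k ≤ s.length := by omega
  have hbase : PySem.List.slice s (some (sep + 1)) none = s.drop k :=
    PySem.List.slice_from s (by omega)
  set base : List Char := s.drop k with hbasedef
  have hbaselen : base.length = s.length - k := by simp [hbasedef]
  have hbget : ∀ i : Nat, base[i]? = s[k + i]? := by
    intro i; simp [hbasedef, List.getElem?_drop]
  set tw : Nat := (base.takeWhile (fun c => c == '.')).length with htwdef
  have htw_sum : tw + (base.dropWhile (fun c => c == '.')).length = base.length := by
    rw [htwdef, ← List.length_append, List.takeWhile_append_dropWhile]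
  -- characters strictly inside the leading-dot prefix are dots
  have htw_dots : ∀ i : Nat, i < tw → base[i]? = some '.' := by
    intro i hi
    rcases (List.takeWhile_prefix (l := base) (fun c => c == '.')) with ⟨t, ht⟩
    have h1 : base[i]? = (base.takeWhile (fun c => c == '.'))[i]? := by
      conv_lhs => rw [← ht]
      rw [List.getElem?_append_left (by omega)]
    have hil : i < (base.takeWhile (fun c => c == '.')).length := by omega
    have h2 := List.getElem?_eq_getElem hil
    have hdot := List.mem_takeWhile_imp (List.getElem_mem hil)
    rw [h1, h2]
    simpa using hdot
  -- the first character after the leading-dot prefix is not a dot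
  have htw_stop : tw < base.length → base[tw]? ≠ some '.' := by
    intro hlt
    have hne : base.dropWhile (fun c => c == '.') ≠ [] := by
      intro h; rw [h] at htw_sum; simp at htw_sum; omega
    have hstop := List.head_dropWhile_not (fun c => c == '.') hne
    have hdw : base.drop tw = base.dropWhile (fun c => c == '.') := by
      conv_lhs => rw [← List.takeWhile_append_dropWhile (p := fun c => c == '.') (l := base)]
      exact List.drop_left' htwdef.symm
    have hne' : base.drop tw ≠ [] := by rw [hdw]; exact hne
    have hhead : (base.drop tw).head hne' = base[tw]'hlt := List.head_drop hne'
    have hstop' : (base[tw]'hlt == '.') = false := by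
      rw [← hhead]
      simp only [hdw]
      exact hstop
    rw [List.getElem?_eq_getElem hlt]
    intro hc
    rw [Option.some.inj hc] at hstop'
    simp at hstop'
  dsimp only []
  rw [← hsepdef, ← hdotdef, hbase]
  have hnl : (base.length : Int) - ((List.dropWhile (fun x => x == '.') base).length : Int)
      = (tw : Int) := by
    have := htw_sum; omega
  rw [hnl]
  by_cases hgt : dot > sep
  · -- A enters the while loop
    rw [if_pos hgt]
    have hd0 : 0 ≤ dot := by omega
    have hci : s[dot.toNat]? = some '.' := by
      have := rfind_get s '.' (by rw [← hdotdef]; exact hd0)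
      rwa [← hdotdef] at this
    have hki : k ≤ dot.toNat := by omega
    have hdl : dot.toNat < s.length := by omega
    have hdotb : PySem.Chars.rfind base ['.'] = ((dot.toNat - k : Nat) : Int) := by
      apply rfind_eq_of
      · rw [hbget]
        have : k + (dot.toNat - k) = dot.toNat := by omega
        rw [this]; exact hci
      · intro j hj
        rw [hbget]
        apply rfind_max s '.'
        rw [← hdotdef]; push_cast; omega
    have hcut : sep + 1 + ((dot.toNat - k : Nat) : Int) = dot := by omega
    rw [hdotb]
    by_cases htww : (tw : Int) ≤ ((dot.toNat - k : Nat) : Int)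
    · -- some non-dot before the dot: both split
      have htwlt : tw < dot.toNat - k := by
        rcases Nat.lt_or_ge tw (dot.toNat - k) with h | h
        · exact h
        · exfalso
          have heq : tw = dot.toNat - k := by omega
          have hlt : tw < base.length := by omega
          apply htw_stop hlt
          rw [heq, hbget]
          have : k + (dot.toNat - k) = dot.toNat := by omega
          rw [this]; exact hci
      rw [if_pos (by exact_mod_cast htww), hcut]
      have hwit : s[k + tw]? ≠ some '.' := by
        rw [← hbget]
        exact htw_stop (by omega)
      rw [loopA_of_ex s dot (dot - (sep + 1)).toNat (sep + 1) rfl (by omega) (by omega)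
        (by omega) ⟨k + tw, by omega, by omega, hwit⟩]
    · -- only dots before the dot: neither splits
      rw [if_neg (by exact_mod_cast htww)]
      have hall : ∀ i : Nat, (sep + 1).toNat ≤ i → i < dot.toNat → s[i]? = some '.' := by
        intro i hi1 hi2
        have h1 : base[i - k]? = s[i]? := by
          rw [hbget]
          have : k + (i - k) = i := by omega
          rw [this]
        rw [← h1]
        exact htw_dots (i - k) (by omega)
      rw [loopA_of_all s dot (dot - (sep + 1)).toNat (sep + 1) rfl (by omega) (by omega)
        (by omega) hall]
      rw [show PySem.List.slice s none (some 0) = [] from by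
          rw [PySem.List.slice_to s le_rfl]; rfl,
        String.ofList_toList]
  · -- no dot after the last separator: both return (p, '')
    rw [if_neg hgt]
    have hdotb : PySem.Chars.rfind base ['.'] = -1 := by
      apply rfind_eq_neg_one
      intro i
      rw [hbget]
      apply rfind_max s '.'
      rw [← hdotdef]; push_cast; omega
    rw [hdotb, if_neg (by omega)]
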